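-- pv_equiv track=rewrite | github.com/antrologos/Transcritorio | packaging/bundle_filter.py | _shared_lib_stem
-- ===== SOURCE A (Python) =====
-- def _shared_lib_stem(basename: str) -> str | None:
--     """Se basename e uma shared lib (.dll / .so[.N] / .dylib), retorna
--     o 'stem' normalizado sem prefixo lib* (Linux) e sem sufixo de versao.
--
--     Exemplos:
--         torch_cuda.dll          -> torch_cuda
--         libtorch_cuda.so        -> torch_cuda
--         libtorch_cuda.so.9.3.0  -> torch_cuda
--         libcudnn.dylib          -> cudnn
--         config.dll              -> config
--         torch_cuda.py           -> None  (nao e shared lib)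
--
--     Retorna None se nao for shared lib reconhecida.
--     """
--     # .dll e .dylib: sempre no final
--     for ext in (".dll", ".dylib"):
--         if basename.endswith(ext):
--             stem = basename[: -len(ext)]
--             if stem.startswith("lib"):
--                 stem = stem[3:]
--             return stem
--     # .so: aparece sozinho ou com sufixo versionado (.so.N, .so.N.M)
--     if ".so" in basename:
--         # corta tudo apos a primeira ocorrencia de ".so"
--         idx = basename.find(".so")
--         # valida que o que segue e '' ou '.N' (digit)
--         tail = basename[idx + 3:]
--         if tail == "" or (tail.startswith(".") and all(c.isdigit() or c == "." for c in tail[1:])):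
--             stem = basename[:idx]
--             if stem.startswith("lib"):
--                 stem = stem[3:]
--             return stem
--     return None
-- ===== SOURCE B (Python) =====
-- def _shared_lib_stem(basename: str) -> str | None:
--     # Tokenize once on '.' and decide over the parts list instead of
--     # scanning the raw string: the last token names a dll/dylib, otherwise
--     # the first token starting with 'so' (after a dot) must be exactly 'so'
--     # followed only by numeric (or empty) version tokens.
--     parts = basename.split('.')
--     if len(parts) > 1 and parts[-1] in ('dll', 'dylib'):
--         stem = '.'.join(parts[:-1])
--     else:
--         for j in range(1, len(parts)):
--             if parts[j].startswith('so'):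
--                 if parts[j] == 'so' and all(p == '' or p.isdigit() for p in parts[j + 1:]):
--                     stem = '.'.join(parts[:j])
--                     break
--                 return None
--         else:
--             return None
--     return stem[3:] if stem.startswith('lib') else stem
-- ===== Notes on version B (the rewrite author's own statement) =====
-- stated objective: alternative
-- what changed: B tokenizes the basename once on the dot separator and decides over the parts list (last token named dll/dylib, else the first token starting with so must be exactly so followed only by numeric-or-empty version tokens), joining the leading tokens back for the stem, instead of A's endswith checks, substring find, index slicing and per-character version scan.
import Mathlib
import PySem

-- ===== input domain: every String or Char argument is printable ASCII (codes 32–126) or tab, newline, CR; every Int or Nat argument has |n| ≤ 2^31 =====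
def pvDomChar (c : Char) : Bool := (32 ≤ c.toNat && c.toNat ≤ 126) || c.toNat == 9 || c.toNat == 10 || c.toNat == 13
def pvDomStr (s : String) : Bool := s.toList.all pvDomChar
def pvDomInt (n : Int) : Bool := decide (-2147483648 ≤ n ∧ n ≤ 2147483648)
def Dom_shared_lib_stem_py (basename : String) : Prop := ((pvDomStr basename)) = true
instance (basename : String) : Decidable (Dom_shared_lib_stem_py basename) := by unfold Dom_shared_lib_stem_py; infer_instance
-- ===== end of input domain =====

-- B tokenizes the basename on '.' and decides over the parts list instead of A's
-- endswith / find / per-character scans (objective: alternative algorithm, same cost).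

-- ===== PORT A =====
def shared_lib_stem_py (basename : String) : Option String :=
  -- for ext in (".dll", ".dylib"): (the two-element loop, unrolled)
  if PySem.Str.endswith basename ".dll" then
    let stem := PySem.Str.slice basename none (some (-4))
    some (if PySem.Str.startswith stem "lib" then PySem.Str.slice stem (some 3) none else stem)
  else if PySem.Str.endswith basename ".dylib" then
    let stem := PySem.Str.slice basename none (some (-6))
    some (if PySem.Str.startswith stem "lib" then PySem.Str.slice stem (some 3) none else stem)
  else if PySem.Str.isIn ".so" basename then
    let idx := PySem.Str.find basename ".so"
    let tail := PySem.Str.slice basename (some (idx + 3)) none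
    if tail == "" ||
       (PySem.Str.startswith tail "." &&
        ((PySem.Str.slice tail (some 1) none).toList.all
          (fun c => PySem.Chars.isdigit c || c == '.'))) then
      let stem := PySem.Str.slice basename none (some idx)
      some (if PySem.Str.startswith stem "lib" then PySem.Str.slice stem (some 3) none else stem)
    else none
  else none

-- ===== PORT B =====
-- stem[3:] if stem.startswith('lib') else stem  (hand port, exact)
def pvRemoveLib (s : List Char) : List Char :=
  if ['l', 'i', 'b'].isPrefixOf s then s.drop 3 else s

-- p == '' or p.isdigit()
def pvVersPart (p : List Char) : Bool := p == [] || PySem.Chars.strIsdigit p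

-- the loop 'for j in range(1, len(parts)): if parts[j].startswith("so")':
-- at the first such token returns (parts[1:j], parts[j], parts[j+1:])
def pvScan : List (List Char) → Option (List (List Char) × List Char × List (List Char))
  | [] => none
  | p :: rest =>
    if ['s', 'o'].isPrefixOf p then some ([], p, rest)
    else
      match pvScan rest with
      | some (b, pj, af) => some (p :: b, pj, af)
      | none => none

-- the '.so' arm: validate the first so-token and join the tokens before it
def pvSoCase (p0 : List Char) (rest : List (List Char)) : Option String :=
  match pvScan rest with
  | some (b, pj, af) =>
    if pj == "so".toList && af.all pvVersPart then
      some (String.ofList (pvRemoveLib (List.intercalate ['.'] (p0 :: b))))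
    else none
  | none => none

def shared_lib_stem_py_alt (basename : String) : Option String :=
  match basename.toList.splitOn '.' with    -- basename.split('.')
  | [] => none                              -- unreachable: split never returns []
  | p0 :: rest =>
    match rest.getLast? with                -- len(parts) > 1 and parts[-1] …
    | some lastP =>
      if lastP == "dll".toList || lastP == "dylib".toList then
        some (String.ofList (pvRemoveLib (List.intercalate ['.'] ((p0 :: rest).dropLast))))
      else pvSoCase p0 rest
    | none => pvSoCase p0 rest

-- ===== PRECONDITION & SPEC =====
def Spec_shared_lib_stem_py (basename : String) (out : Option String) : Prop := out = shared_lib_stem_py_alt basename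
instance (basename : String) (out : Option String) : Decidable (Spec_shared_lib_stem_py basename out) := by unfold Spec_shared_lib_stem_py; infer_instance

-- ===== CLAIM (what is proved, stated in full; the proofs are below) =====
def Claim_equal_shared_lib_stem_py : Prop := ∀ (basename : String), Dom_shared_lib_stem_py basename → Spec_shared_lib_stem_py basename (shared_lib_stem_py basename)

-- ===== LEMMAS AND PROOFS =====

-- '.'-joined tail of a parts list
def pvTJ (ps : List (List Char)) : List Char := ps.flatMap (fun p => '.' :: p)

-- first-'.so' partition of the raw string (the quantity A's find/slice code computes)
def pvPartSo : List Char → Option (List Char × List Char)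
  | [] => none
  | c :: rest =>
    if ['.', 's', 'o'].isPrefixOf (c :: rest) then some ([], rest.drop 2)
    else
      match pvPartSo rest with
      | some (h, t) => some (c :: h, t)
      | none => none

-- A's version-tail test
def pvVersionTail : List Char → Bool
  | [] => true
  | c :: rest => c == '.' && (PySem.Chars.stripChars rest "0123456789.".toList == [])

-- A's whole '.so' arm as a function of the partition
def pvAltSo (l : List Char) : Option String :=
  match pvPartSo l with
  | some (head, tail) =>
    if pvVersionTail tail then some (String.ofList (pvRemoveLib head)) else none
  | none => none

theorem pvIntercalate_eq (p0 : List Char) (ps : List (List Char)) :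
    List.intercalate ['.'] (p0 :: ps) = p0 ++ pvTJ ps := by
  induction ps generalizing p0 with
  | nil => simp [pvTJ, List.intercalate]
  | cons q qs ih =>
    have h2 : List.intercalate ['.'] (p0 :: q :: qs)
        = p0 ++ ['.'] ++ List.intercalate ['.'] (q :: qs) := by
      simp [List.intercalate, List.intersperse_cons₂]
    rw [h2, ih]
    simp [pvTJ]

theorem pvSplit_nodot (l : List Char) : ∀ p ∈ l.splitOn '.', '.' ∉ p := by
  induction l with
  | nil => simp [List.splitOn]
  | cons c tl ih =>
    intro p hp
    rw [show (c :: tl).splitOn '.' = (c :: tl).splitOnP (· == '.') from rfl,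
      List.splitOnP_cons] at hp
    by_cases hc : c = '.'
    · simp [hc] at hp
      rcases hp with rfl | hp
      · simp
      · exact ih p hp
    · rw [if_neg (by simp [hc])] at hp
      obtain ⟨h0, t0, h01⟩ := List.exists_cons_of_ne_nil (List.splitOnP_ne_nil (· == '.') tl)
      rw [h01, List.modifyHead_cons] at hp
      rcases List.mem_cons.mp hp with rfl | hp
      · intro hm
        rcases List.mem_cons.mp hm with rfl | hm
        · exact hc rfl
        · exact ih h0 (by rw [show tl.splitOn '.' = tl.splitOnP (· == '.') from rfl, h01]; simp) hm
      · exact ih p (by rw [show tl.splitOn '.' = tl.splitOnP (· == '.') from rfl, h01]; simp [hp])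

theorem pvSplit_join (l : List Char) (p0 : List Char) (rest : List (List Char))
    (h : l.splitOn '.' = p0 :: rest) : l = p0 ++ pvTJ rest := by
  have := List.intercalate_splitOn (xs := l) '.'
  rw [h, pvIntercalate_eq] at this
  exact this.symm

theorem pvSplit_append_ext (pre ext : List Char) (hx : '.' ∉ ext) :
    (pre ++ '.' :: ext).splitOn '.' = pre.splitOn '.' ++ [ext] := by
  rw [show ∀ u : List Char, u.splitOn '.' = u.splitOnP (· == '.') from fun _ => rfl,
    List.splitOnP_append_cons _ _ _ '.' (by simp),
    List.splitOnP_eq_single (xs := ext) _ (by intro x hxm; simp; rintro rfl; exact hx hxm)]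
  rfl

theorem pvPartSo_eq_none_iff (l : List Char) : pvPartSo l = none ↔ ¬ ['.', 's', 'o'] <:+: l := by
  induction l with
  | nil => simp [pvPartSo]
  | cons c rest ih =>
    simp only [pvPartSo]
    by_cases hp : ['.', 's', 'o'].isPrefixOf (c :: rest)
    · have := List.isPrefixOf_iff_prefix.mp hp
      simp only [hp, if_true]
      constructor
      · intro h; exact absurd h (by simp)
      · intro h; exact absurd (List.infix_cons_iff.mpr (Or.inl this)) h
    · simp only [hp]
      rw [List.isPrefixOf_iff_prefix] at hp
      cases h : pvPartSo rest with
      | some p => simp_all [List.infix_cons_iff]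
      | none =>
        simp only [List.infix_cons_iff]
        simp_all
        exact hp

theorem pvPartSo_spec (l h t : List Char) (hp : pvPartSo l = some (h, t)) :
    l = h ++ ['.', 's', 'o'] ++ t ∧ ∀ i < h.length, ¬ ['.', 's', 'o'] <+: l.drop i := by
  induction l generalizing h t with
  | nil => simp [pvPartSo] at hp
  | cons c rest ih =>
    simp only [pvPartSo] at hp
    by_cases hpre : ['.', 's', 'o'].isPrefixOf (c :: rest)
    · simp only [hpre, if_true] at hp
      simp only [Option.some_inj, Prod.mk.injEq] at hp
      obtain ⟨hh, ht⟩ := hp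
      obtain ⟨suf, hsuf⟩ := List.isPrefixOf_iff_prefix.mp hpre
      simp only [List.cons_append, List.cons.injEq] at hsuf
      obtain ⟨hc, hrest⟩ := hsuf
      subst hh; subst ht; subst hc
      constructor
      · simp [← hrest]
      · intro i hi; simp at hi
    · simp only [hpre] at hp
      cases hr : pvPartSo rest with
      | some p =>
        obtain ⟨h', t'⟩ := p
        rw [hr] at hp
        simp at hp
        obtain ⟨hh, ht⟩ := hp
        obtain ⟨e1, e2⟩ := ih h' t' hr
        subst hh; subst ht
        constructor
        · simp [e1]
        · intro i hi
          cases i with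
          | zero => simpa [List.isPrefixOf_iff_prefix] using hpre
          | succ j =>
            simp only [List.drop_succ_cons]
            exact e2 j (by simpa using hi)
      | none => rw [hr] at hp; simp at hp

theorem pvFind_eq (l h t : List Char) (hp : pvPartSo l = some (h, t)) :
    PySem.Chars.find l ['.', 's', 'o'] = (h.length : Int) := by
  obtain ⟨hl, hmin⟩ := pvPartSo_spec l h t hp
  have hinf : ['.', 's', 'o'] <:+: l := ⟨h, t, by simpa using hl.symm⟩
  have hnn : 0 ≤ PySem.Chars.find l ['.', 's', 'o'] :=
    (PySem.Chars.find_nonneg_iff l _).mpr hinf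
  obtain ⟨hpre, hfmin⟩ := PySem.Chars.find_spec hnn
  have hph : ['.', 's', 'o'] <+: l.drop h.length := by
    rw [hl]; simp
  have heq : (PySem.Chars.find l ['.', 's', 'o']).toNat = h.length := by
    rcases lt_trichotomy (PySem.Chars.find l ['.', 's', 'o']).toNat h.length with hlt | he | hgt
    · exact absurd hpre (hmin _ hlt)
    · exact he
    · exact absurd hph (hfmin _ hgt)
  omega

theorem pvDigitDot_mem (c : Char) :
    ("0123456789.".toList.contains c) = (PySem.Chars.isdigit c || c == '.') := by
  have hcn : ∀ d : Char, c.toNat = d.toNat → c = d := by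
    intro d h
    exact Char.ext (by exact UInt32.toNat_inj.mp h)
  show ([ '0','1','2','3','4','5','6','7','8','9','.'].contains c) = _
  rw [Bool.eq_iff_iff]
  simp only [PySem.Chars.isdigit, List.contains_eq_mem, List.mem_cons, List.not_mem_nil, or_false,
    Bool.or_eq_true, Bool.and_eq_true, decide_eq_true_eq, beq_iff_eq]
  constructor
  · rintro (rfl | rfl | rfl | rfl | rfl | rfl | rfl | rfl | rfl | rfl | rfl) <;>
      first | (right; rfl) | (left; constructor <;> decide)
  · rintro (⟨h1, h2⟩ | rfl)
    · rw [Char.le_def, UInt32.le_iff_toNat_le] at h1 h2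
      have h48 : ('0' : Char).val.toNat = 48 := by decide
      have h57 : ('9' : Char).val.toNat = 57 := by decide
      rw [h48] at h1; rw [h57] at h2
      have hd : c.toNat = 48 ∨ c.toNat = 49 ∨ c.toNat = 50 ∨ c.toNat = 51 ∨ c.toNat = 52 ∨
          c.toNat = 53 ∨ c.toNat = 54 ∨ c.toNat = 55 ∨ c.toNat = 56 ∨ c.toNat = 57 := by
        simp only [Char.toNat]; omega
      rcases hd with h | h | h | h | h | h | h | h | h | h
      · exact Or.inl (hcn '0' (by rw [h]; decide))
      · exact Or.inr (Or.inl (hcn '1' (by rw [h]; decide)))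
      · exact Or.inr (Or.inr (Or.inl (hcn '2' (by rw [h]; decide))))
      · exact Or.inr (Or.inr (Or.inr (Or.inl (hcn '3' (by rw [h]; decide)))))
      · exact Or.inr (Or.inr (Or.inr (Or.inr (Or.inl (hcn '4' (by rw [h]; decide))))))
      · exact Or.inr (Or.inr (Or.inr (Or.inr (Or.inr (Or.inl (hcn '5' (by rw [h]; decide)))))))
      · exact Or.inr (Or.inr (Or.inr (Or.inr (Or.inr (Or.inr (Or.inl (hcn '6' (by rw [h]; decide))))))))
      · exact Or.inr (Or.inr (Or.inr (Or.inr (Or.inr (Or.inr (Or.inr (Or.inl (hcn '7' (by rw [h]; decide)))))))))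
      · exact Or.inr (Or.inr (Or.inr (Or.inr (Or.inr (Or.inr (Or.inr (Or.inr (Or.inl (hcn '8' (by rw [h]; decide))))))))))
      · exact Or.inr (Or.inr (Or.inr (Or.inr (Or.inr (Or.inr (Or.inr (Or.inr (Or.inr (Or.inl (hcn '9' (by rw [h]; decide)))))))))))
    · simp

theorem pvDropWhile_all {p : Char → Bool} (s : List Char) :
    (∀ a ∈ s.dropWhile p, p a) ↔ ∀ a ∈ s, p a := by
  constructor
  · intro h a ha
    by_cases hd : s.dropWhile p = []
    · have hs : s = s.takeWhile p ++ s.dropWhile p := (List.takeWhile_append_dropWhile).symm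
      rw [hd, List.append_nil] at hs
      exact List.mem_takeWhile_imp (hs ▸ ha)
    · have := List.head_dropWhile_not p hd
      rw [h _ (List.head_mem hd)] at this
      exact absurd this (by simp)
  · intro h a ha
    exact h a ((List.dropWhile_sublist p).mem ha)

theorem pvStrip_eq_nil_iff (s : List Char) :
    (PySem.Chars.stripChars s "0123456789.".toList == []) =
      s.all (fun c => PySem.Chars.isdigit c || c == '.') := by
  rw [Bool.eq_iff_iff]
  simp only [PySem.Chars.stripChars, beq_iff_eq, List.reverse_eq_nil_iff,
    List.dropWhile_eq_nil_iff, List.mem_reverse, List.all_eq_true]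
  rw [pvDropWhile_all]
  constructor
  · intro h a ha
    have := h a ha
    rwa [pvDigitDot_mem] at this
  · intro h a ha
    rw [pvDigitDot_mem]
    simpa using h a ha

theorem pvStripLib_eq (p : List Char) :
    (if PySem.Str.startswith (String.ofList p) "lib"
     then PySem.Str.slice (String.ofList p) (some 3) none
     else String.ofList p) = String.ofList (pvRemoveLib p) := by
  have h3 : PySem.Chars.slice p (some 3) none = p.drop 3 := by
    rw [show PySem.Chars.slice p (some 3) none = PySem.List.slice p (some 3) none from rfl,
      PySem.List.slice_from p (by norm_num : (0:Int) ≤ 3)]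
    rfl
  simp only [PySem.Str.startswith, PySem.Chars.startswith, PySem.Str.slice,
    String.toList_ofList, show "lib".toList = ['l','i','b'] from rfl, pvRemoveLib, h3]
  split_ifs <;> simp_all

theorem pvSoBranch_eq (basename : String) :
    (if PySem.Str.isIn ".so" basename then
      let idx := PySem.Str.find basename ".so"
      let tail := PySem.Str.slice basename (some (idx + 3)) none
      if tail == "" ||
         (PySem.Str.startswith tail "." &&
          ((PySem.Str.slice tail (some 1) none).toList.all
            (fun c => PySem.Chars.isdigit c || c == '.'))) then
        let stem := PySem.Str.slice basename none (some idx)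
        some (if PySem.Str.startswith stem "lib" then PySem.Str.slice stem (some 3) none else stem)
      else none
    else none) = pvAltSo basename.toList := by
  by_cases hso : PySem.Str.isIn ".so" basename
  · -- '.so' occurs: partition succeeds and splits where find points
    have hinf : ['.', 's', 'o'] <:+: basename.toList := by
      have := (PySem.Chars.isIn_iff_infix ".so".toList basename.toList).mp hso
      simpa using this
    cases hps : pvPartSo basename.toList with
    | none => exact absurd hinf ((pvPartSo_eq_none_iff _).mp hps)
    | some p =>
      obtain ⟨h, t⟩ := p
      obtain ⟨hl, -⟩ := pvPartSo_spec _ _ _ hps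
      have hfind : PySem.Str.find basename ".so" = (h.length : Int) := pvFind_eq _ _ _ hps
      have hlen3 : (h ++ ['.', 's', 'o']).length = h.length + 3 := by simp
      have htail : PySem.Str.slice basename (some (PySem.Str.find basename ".so" + 3)) none
          = String.ofList t := by
        rw [hfind]
        simp only [PySem.Str.slice]
        rw [show ((h.length : Int) + 3) = ((h.length + 3 : Nat) : Int) by push_cast; ring]
        rw [show PySem.Chars.slice basename.toList (some ((h.length + 3 : Nat) : Int)) none
            = PySem.List.slice basename.toList (some ((h.length + 3 : Nat) : Int)) none from rfl,
          PySem.List.slice_from _ (by positivity)]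
        congr 1
        rw [Int.toNat_natCast, hl, ← hlen3,
          show h ++ ['.', 's', 'o'] ++ t = (h ++ ['.', 's', 'o']) ++ t from by simp]
        exact List.drop_left
      have hstem : PySem.Str.slice basename none (some (PySem.Str.find basename ".so"))
          = String.ofList h := by
        rw [hfind]
        simp only [PySem.Str.slice]
        rw [show PySem.Chars.slice basename.toList none (some (h.length : Int))
            = PySem.List.slice basename.toList none (some (h.length : Int)) from rfl,
          PySem.List.slice_to _ (by positivity)]
        congr 1
        rw [Int.toNat_natCast, hl]
        rw [show h ++ ['.', 's', 'o'] ++ t = h ++ (['.', 's', 'o'] ++ t) from by simp]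
        exact List.take_left
      have hcond : ((String.ofList t == "") ||
          (PySem.Str.startswith (String.ofList t) "." &&
           ((PySem.Str.slice (String.ofList t) (some 1) none).toList.all
             (fun c => PySem.Chars.isdigit c || c == '.')))) = pvVersionTail t := by
        cases t with
        | nil => rfl
        | cons c rest =>
          have hne : (String.ofList (c :: rest) == "") = false := by
            apply beq_eq_false_iff_ne.mpr
            intro hh
            have h2 : c :: rest = "".toList := by
              rw [← String.toList_ofList (l := c :: rest), hh]
            exact List.cons_ne_nil c rest (h2.trans rfl)
          have hsw : PySem.Str.startswith (String.ofList (c :: rest)) "." = (c == '.') := by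
            simp only [PySem.Str.startswith, String.toList_ofList,
              show ".".toList = ['.'] from rfl, PySem.Chars.startswith]
            rw [Bool.eq_iff_iff, beq_iff_eq]
            simp only [List.isPrefixOf_iff_prefix, List.cons_prefix_cons, List.nil_prefix, and_true]
            exact eq_comm
          have hdrop : (PySem.Str.slice (String.ofList (c :: rest)) (some 1) none).toList = rest := by
            simp only [PySem.Str.slice, String.toList_ofList]
            rw [show PySem.Chars.slice (c :: rest) (some 1) none
                = PySem.List.slice (c :: rest) (some 1) none from rfl,
              PySem.List.slice_from _ (by norm_num : (0:Int) ≤ 1)]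
            simp
          rw [hne, hsw, hdrop, pvVersionTail, pvStrip_eq_nil_iff]
          simp
      simp only [hso, if_true, pvAltSo, hps, htail, hstem, hcond, pvStripLib_eq]
  · -- no '.so': both sides are none
    have hni : ¬ ['.', 's', 'o'] <:+: basename.toList := by
      have := (PySem.Chars.isIn_eq_false_iff ".so".toList basename.toList).mp
        (by simpa using hso)
      simpa using this
    have hps : pvPartSo basename.toList = none := (pvPartSo_eq_none_iff _).mpr hni
    simp only [pvAltSo, hps]
    rw [if_neg hso]

theorem pvDllCaseStem (basename : String) (pre ext : List Char) (k : Nat) (hk : 1 < k)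
    (hpre : pre ++ ext = basename.toList) (hlen : ext.length = k) :
    PySem.Str.slice basename none (some (-(OfNat.ofNat k : Int))) = String.ofList pre := by
  simp only [PySem.Str.slice]
  congr 1
  rw [show PySem.Chars.slice basename.toList none (some (-(OfNat.ofNat k : Int)))
      = PySem.List.slice basename.toList none (some (-(OfNat.ofNat k : Int))) from rfl,
    PySem.List.slice_to_neg_ofNat _ k hk, ← hpre]
  simp [hlen]

-- pvPartSo through a dot-free prefix
theorem pvPartSo_ext (h0 k : List Char) (hd : '.' ∉ h0) :
    pvPartSo (h0 ++ k) = (pvPartSo k).map (fun p => (h0 ++ p.1, p.2)) := by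
  induction h0 with
  | nil =>
    simp only [List.nil_append]
    cases pvPartSo k <;> simp
  | cons c h0' ih =>
    have hc : c ≠ '.' := by rintro rfl; exact hd (by simp)
    have hnp : ['.', 's', 'o'].isPrefixOf (c :: (h0' ++ k)) = false := by
      simp [List.isPrefixOf, Ne.symm hc]
    rw [List.cons_append, pvPartSo]
    rw [hnp]
    simp only [Bool.false_eq_true, if_false]
    rw [ih (by intro hm; exact hd (by simp [hm]))]
    cases pvPartSo k with
    | none => rfl
    | some p => rfl

theorem pvScan_sound (ps : List (List Char)) (b : List (List Char)) (pj : List Char)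
    (af : List (List Char)) (h : pvScan ps = some (b, pj, af)) :
    ['s', 'o'].isPrefixOf pj ∧ ps = b ++ pj :: af := by
  induction ps generalizing b with
  | nil => simp [pvScan] at h
  | cons q qs ih =>
    rw [pvScan] at h
    by_cases hq : ['s', 'o'].isPrefixOf q
    · rw [if_pos hq] at h
      simp at h
      obtain ⟨rfl, rfl, rfl⟩ := h
      exact ⟨hq, by simp⟩
    · rw [if_neg hq] at h
      cases hr : pvScan qs with
      | none => rw [hr] at h; simp at h
      | some r =>
        obtain ⟨b', pj', af'⟩ := r
        rw [hr] at h
        simp at h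
        obtain ⟨rfl, rfl, rfl⟩ := h
        obtain ⟨h1, h2⟩ := ih b' hr
        exact ⟨h1, by simp [h2]⟩

-- pvPartSo of the joined tail follows pvScan of the parts
theorem pvPartSo_tj (ps : List (List Char)) (hdf : ∀ p ∈ ps, '.' ∉ p) :
    pvPartSo (pvTJ ps) =
      (pvScan ps).map (fun q => (pvTJ q.1, q.2.1.drop 2 ++ pvTJ q.2.2)) := by
  induction ps with
  | nil => simp [pvTJ, pvPartSo, pvScan]
  | cons q qs ih =>
    have htj : pvTJ (q :: qs) = '.' :: (q ++ pvTJ qs) := by simp [pvTJ]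
    rw [htj, pvPartSo, pvScan]
    by_cases hq : ['s', 'o'].isPrefixOf q
    · obtain ⟨q', hq'⟩ := List.isPrefixOf_iff_prefix.mp hq
      have hpre : ['.', 's', 'o'].isPrefixOf ('.' :: (q ++ pvTJ qs)) = true := by
        rw [List.isPrefixOf_iff_prefix]
        refine List.cons_prefix_cons.mpr ⟨rfl, ?_⟩
        rw [← hq', List.append_assoc]
        exact List.prefix_append _ _
      rw [if_pos hpre, if_pos hq]
      simp only [Option.map_some]
      rw [← hq']
      simp [pvTJ]
    · have hq2 : ['s', 'o'].isPrefixOf (q ++ pvTJ qs) = false := by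
        rw [Bool.eq_false_iff]
        intro hpp
        rw [List.isPrefixOf_iff_prefix] at hpp
        match q, hpp with
        | [], hpp =>
          cases qs with
          | nil => simp [pvTJ] at hpp
          | cons a as =>
            rw [show ([] : List Char) ++ pvTJ (a :: as) = '.' :: (a ++ pvTJ as) by simp [pvTJ]] at hpp
            rw [List.cons_prefix_cons] at hpp
            exact absurd hpp.1 (by decide)
        | [x], hpp =>
          cases qs with
          | nil => simp [pvTJ] at hpp
          | cons a as =>
            rw [show [x] ++ pvTJ (a :: as) = x :: '.' :: (a ++ pvTJ as) by simp [pvTJ]] at hpp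
            rw [List.cons_prefix_cons, List.cons_prefix_cons] at hpp
            exact absurd hpp.2.1 (by decide)
        | x :: y :: q2, hpp =>
          apply hq
          rw [List.isPrefixOf_iff_prefix]
          rw [show (x :: y :: q2) ++ pvTJ qs = x :: y :: (q2 ++ pvTJ qs) by simp] at hpp
          rw [List.cons_prefix_cons, List.cons_prefix_cons] at hpp
          obtain ⟨rfl, rfl, -⟩ := hpp
          simp
      have hpre : ['.', 's', 'o'].isPrefixOf ('.' :: (q ++ pvTJ qs)) = false := by
        simp only [List.isPrefixOf, beq_self_eq_true, Bool.true_and]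
        exact hq2
      rw [hpre]
      simp only [Bool.false_eq_true, if_false, hq]
      rw [pvPartSo_ext q (pvTJ qs) (hdf q (by simp)), ih (fun p hp => hdf p (by simp [hp]))]
      cases pvScan qs with
      | none => rfl
      | some r =>
        obtain ⟨b', pj', af'⟩ := r
        simp [pvTJ]

theorem pvVersPart_eq (p : List Char) : pvVersPart p = p.all PySem.Chars.isdigit := by
  cases p <;> simp [pvVersPart, PySem.Chars.strIsdigit, List.isEmpty]

theorem pvAllDD_tj (af : List (List Char)) (hdf : ∀ p ∈ af, '.' ∉ p) :
    (pvTJ af).all (fun c => PySem.Chars.isdigit c || c == '.') = af.all pvVersPart := by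
  induction af with
  | nil => simp [pvTJ]
  | cons a as ih =>
    rw [show pvTJ (a :: as) = '.' :: (a ++ pvTJ as) by simp [pvTJ]]
    simp only [List.all_cons, List.all_append, ih (fun p hp => hdf p (by simp [hp])),
      pvVersPart_eq a]
    have ha : a.all (fun c => PySem.Chars.isdigit c || c == '.') = a.all PySem.Chars.isdigit := by
      rw [Bool.eq_iff_iff]
      simp only [List.all_eq_true, Bool.or_eq_true, beq_iff_eq]
      constructor
      · intro h c hc
        rcases h c hc with h1 | h1
        · exact h1
        · exact absurd h1 (by rintro rfl; exact hdf a (by simp) hc)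
      · intro h c hc
        exact Or.inl (h c hc)
    rw [ha]
    simp

theorem pvVersionTail_eq (pj : List Char) (af : List (List Char))
    (hpj : '.' ∉ pj) (hso : ['s', 'o'].isPrefixOf pj) (hdf : ∀ p ∈ af, '.' ∉ p) :
    pvVersionTail (pj.drop 2 ++ pvTJ af) = (pj == "so".toList && af.all pvVersPart) := by
  obtain ⟨pjr, rfl⟩ := List.isPrefixOf_iff_prefix.mp hso
  have hdrop : (['s', 'o'] ++ pjr).drop 2 = pjr := by simp
  rw [hdrop]
  cases pjr with
  | cons c cr =>
    have hc : (c == '.') = false := by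
      simp only [beq_eq_false_iff_ne, ne_eq]
      rintro rfl; exact hpj (by simp)
    have hne : ((['s', 'o'] ++ c :: cr) == "so".toList) = false := by
      simp [show "so".toList = ['s','o'] from rfl]
    rw [hne, List.cons_append, pvVersionTail, hc]
    simp
  | nil =>
    cases af with
    | nil => simp [pvTJ, pvVersionTail, show "so".toList = ['s','o'] from rfl]
    | cons a as =>
      rw [show ([] : List Char) ++ pvTJ (a :: as) = '.' :: (a ++ pvTJ as) by simp [pvTJ]]
      rw [pvVersionTail, pvStrip_eq_nil_iff]
      rw [show (a ++ pvTJ as).all (fun c => PySem.Chars.isdigit c || c == '.')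
          = (pvTJ (a :: as)).all (fun c => PySem.Chars.isdigit c || c == '.') by
        simp [pvTJ]]
      rw [pvAllDD_tj _ hdf]
      simp [show "so".toList = ['s','o'] from rfl]

-- A's '.so' arm equals B's parts-based arm
theorem pvAltSo_eq_soCase (l p0 : List Char) (rest : List (List Char))
    (h : l.splitOn '.' = p0 :: rest) : pvAltSo l = pvSoCase p0 rest := by
  have hdf : ∀ p ∈ rest, '.' ∉ p := fun p hp => pvSplit_nodot l p (by rw [h]; simp [hp])
  have hd0 : '.' ∉ p0 := pvSplit_nodot l p0 (by rw [h]; simp)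
  have hjoin := pvSplit_join l p0 rest h
  have hpart : pvPartSo l =
      ((pvScan rest).map (fun q => (pvTJ q.1, q.2.1.drop 2 ++ pvTJ q.2.2))).map
        (fun p => (p0 ++ p.1, p.2)) := by
    rw [hjoin, pvPartSo_ext p0 _ hd0, pvPartSo_tj rest hdf]
  cases hs : pvScan rest with
  | none =>
    rw [hs] at hpart
    simp only [Option.map_none] at hpart
    rw [pvAltSo, hpart, pvSoCase, hs]
  | some r =>
    obtain ⟨b, pj, af⟩ := r
    rw [hs] at hpart
    simp only [Option.map_some] at hpart
    obtain ⟨hso, hrest⟩ := pvScan_sound rest b pj af hs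
    have hpj : '.' ∉ pj := hdf pj (by rw [hrest]; simp)
    have haf : ∀ p ∈ af, '.' ∉ p := fun p hp => hdf p (by rw [hrest]; simp [hp])
    simp only [pvAltSo, hpart, pvSoCase, hs]
    rw [pvVersionTail_eq pj af hpj hso haf, pvIntercalate_eq]

-- A's endswith '.ext' test read on the parts list
theorem pvEndswith_iff (l ext : List Char) (hx : '.' ∉ ext) (p0 : List Char)
    (rest : List (List Char)) (h : l.splitOn '.' = p0 :: rest) :
    PySem.Chars.endswith l ('.' :: ext) = true ↔ rest.getLast? = some ext := by
  constructor
  · intro he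
    obtain ⟨pre, hpre⟩ := (PySem.Chars.endswith_iff l ('.' :: ext)).mp he
    have hl : l = pre ++ '.' :: ext := hpre.symm
    have hsp : l.splitOn '.' = pre.splitOn '.' ++ [ext] := by
      rw [hl]; exact pvSplit_append_ext pre ext hx
    obtain ⟨q, qs, hq⟩ := List.exists_cons_of_ne_nil (List.splitOnP_ne_nil (· == '.') pre)
    rw [show pre.splitOn '.' = pre.splitOnP (· == '.') from rfl, hq] at hsp
    rw [h] at hsp
    simp only [List.cons_append, List.cons.injEq] at hsp
    rw [hsp.2, List.getLast?_concat]
  · intro hlast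
    obtain ⟨l', rfl⟩ := List.getLast?_eq_some_iff.mp hlast
    have hjoin := pvSplit_join l p0 (l' ++ [ext]) h
    rw [PySem.Chars.endswith_iff]
    refine ⟨p0 ++ pvTJ l', ?_⟩
    rw [hjoin]
    simp [pvTJ]

-- ===== VERDICT (by name: the statement is the Claim_ definition above) =====
theorem shared_lib_stem_py_spec : Claim_equal_shared_lib_stem_py := by
  intro basename _
  unfold Spec_shared_lib_stem_py
  obtain ⟨p0, rest, hsp⟩ := List.exists_cons_of_ne_nil
    (List.splitOnP_ne_nil (· == '.') basename.toList)
  have hsp : basename.toList.splitOn '.' = p0 :: rest := hsp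
  have hiff_dll : PySem.Str.endswith basename ".dll" = true ↔ rest.getLast? = some ['d','l','l'] := by
    rw [show PySem.Str.endswith basename ".dll"
        = PySem.Chars.endswith basename.toList ('.' :: ['d','l','l']) from rfl]
    exact pvEndswith_iff _ _ (by decide) _ _ hsp
  have hiff_dy : PySem.Str.endswith basename ".dylib" = true ↔
      rest.getLast? = some ['d','y','l','i','b'] := by
    rw [show PySem.Str.endswith basename ".dylib"
        = PySem.Chars.endswith basename.toList ('.' :: ['d','y','l','i','b']) from rfl]
    exact pvEndswith_iff _ _ (by decide) _ _ hsp
  simp only [shared_lib_stem_py_alt, hsp]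
  cases hlast : rest.getLast? with
  | none =>
    have hdll : PySem.Str.endswith basename ".dll" = false := by
      rw [Bool.eq_false_iff]; intro hc; rw [hiff_dll.mp hc] at hlast; cases hlast
    have hdy : PySem.Str.endswith basename ".dylib" = false := by
      rw [Bool.eq_false_iff]; intro hc; rw [hiff_dy.mp hc] at hlast; cases hlast
    rw [shared_lib_stem_py, if_neg (by simp only [hdll]; simp), if_neg (by simp only [hdy]; simp)]
    rw [pvSoBranch_eq basename, pvAltSo_eq_soCase basename.toList p0 rest hsp]
  | some lastP =>
    by_cases hdll : lastP = ['d','l','l']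
    · subst hdll
      obtain ⟨l', rfl⟩ := List.getLast?_eq_some_iff.mp hlast
      have hjoin := pvSplit_join basename.toList p0 _ hsp
      have hpre : (p0 ++ pvTJ l') ++ ['.','d','l','l'] = basename.toList := by
        rw [hjoin]; simp [pvTJ]
      have hend : PySem.Str.endswith basename ".dll" = true :=
        hiff_dll.mpr List.getLast?_concat
      have hstem := pvDllCaseStem basename (p0 ++ pvTJ l') ['.','d','l','l'] 4
        (by norm_num) hpre rfl
      have hdrop : (p0 :: (l' ++ [['d','l','l']])).dropLast = p0 :: l' := by
        rw [show p0 :: (l' ++ [['d','l','l']]) = (p0 :: l') ++ [['d','l','l']] from rfl,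
          List.dropLast_concat]
      rw [shared_lib_stem_py, if_pos hend]
      simp only [hstem, pvStripLib_eq, hdrop, pvIntercalate_eq]
      rw [if_pos (by simp)]
    · by_cases hdy : lastP = ['d','y','l','i','b']
      · subst hdy
        obtain ⟨l', rfl⟩ := List.getLast?_eq_some_iff.mp hlast
        have hjoin := pvSplit_join basename.toList p0 _ hsp
        have hpre : (p0 ++ pvTJ l') ++ ['.','d','y','l','i','b'] = basename.toList := by
          rw [hjoin]; simp [pvTJ]
        have hend : PySem.Str.endswith basename ".dylib" = true :=
          hiff_dy.mpr List.getLast?_concat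
        have hnd : PySem.Str.endswith basename ".dll" = false := by
          rw [Bool.eq_false_iff]; intro hc
          have := hiff_dll.mp hc
          rw [List.getLast?_concat] at this
          simp at this
        have hstem := pvDllCaseStem basename (p0 ++ pvTJ l') ['.','d','y','l','i','b'] 6
          (by norm_num) hpre rfl
        have hdrop : (p0 :: (l' ++ [['d','y','l','i','b']])).dropLast = p0 :: l' := by
          rw [show p0 :: (l' ++ [['d','y','l','i','b']]) = (p0 :: l') ++ [['d','y','l','i','b']] from rfl,
            List.dropLast_concat]
        rw [shared_lib_stem_py, if_neg (by simp only [hnd]; simp), if_pos hend]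
        simp only [hstem, pvStripLib_eq, hdrop, pvIntercalate_eq]
        rw [if_pos (by simp [show "dylib".toList = ['d','y','l','i','b'] from rfl])]
      · have hnd : PySem.Str.endswith basename ".dll" = false := by
          rw [Bool.eq_false_iff]; intro hc
          rw [hiff_dll.mp hc] at hlast
          exact hdll (Option.some_inj.mp hlast).symm
        have hny : PySem.Str.endswith basename ".dylib" = false := by
          rw [Bool.eq_false_iff]; intro hc
          rw [hiff_dy.mp hc] at hlast
          exact hdy (Option.some_inj.mp hlast).symm
        rw [shared_lib_stem_py, if_neg (by simp only [hnd]; simp), if_neg (by simp only [hny]; simp)]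
        rw [pvSoBranch_eq basename, pvAltSo_eq_soCase basename.toList p0 rest hsp]
        dsimp only
        rw [if_neg (by
          simp only [Bool.or_eq_true, beq_iff_eq]
          rintro (h | h)
          · exact hdll (by simpa [show "dll".toList = ['d','l','l'] from rfl] using h)
          · exact hdy (by simpa [show "dylib".toList = ['d','y','l','i','b'] from rfl] using h))]
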